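-- pv_equiv track=rewrite | github.com/pypi-data/pypi-mirror-351 | packages/surykatka/surykatka-0.9.0.tar.gz/surykatka-0.9.0/src/surykatka/bot.py | calculateWhoisDomainList
-- ===== SOURCE A (Python) =====
-- def calculateWhoisDomainList(domain_list):
--     # Calculate the top domain for whois
--     domain_list = domain_list.copy()
--     domain_list.sort(key=lambda x: x.count("."))
--     i = 0
--     while i < len(domain_list):
--         base_domain = ".%s" % domain_list[i]
--         j = i + 1
--         while j < len(domain_list):
--             sub_domain = domain_list[j]
--             if sub_domain.endswith(base_domain):
--                 domain_list.pop(j)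
--             else:
--                 j += 1
--         i += 1
--
--     return domain_list
-- ===== SOURCE B (Python) =====
-- def calculateWhoisDomainList(domain_list):
--     # Hash-set of all domains; keep a domain iff none of its dot-suffix ancestors is present.
--     domains = set(domain_list)
--     return [
--         d
--         for d in sorted(domain_list, key=lambda x: x.count("."))
--         if not any(c == "." and d[i + 1:] in domains for i, c in enumerate(d))
--     ]
-- ===== Notes on version B (the rewrite author's own statement) =====
-- stated objective: faster
-- what changed: A repeatedly rescans and pops the tail of the sorted list for every kept domain (quadratic in the number of domains); B builds one hash set of all domains and keeps a domain iff none of its dot-suffix ancestors is in the set, in a single filter pass.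
import Mathlib
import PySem

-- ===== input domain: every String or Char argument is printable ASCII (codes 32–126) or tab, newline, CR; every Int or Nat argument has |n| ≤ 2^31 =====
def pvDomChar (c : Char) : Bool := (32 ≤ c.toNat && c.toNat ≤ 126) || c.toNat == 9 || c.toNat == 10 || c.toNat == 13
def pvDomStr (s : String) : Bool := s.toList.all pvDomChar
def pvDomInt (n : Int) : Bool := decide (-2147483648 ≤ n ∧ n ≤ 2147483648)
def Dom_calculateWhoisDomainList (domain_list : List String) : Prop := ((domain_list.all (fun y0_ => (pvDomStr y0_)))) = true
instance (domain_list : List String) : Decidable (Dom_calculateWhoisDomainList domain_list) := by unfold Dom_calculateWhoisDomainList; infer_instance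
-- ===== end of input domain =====

-- B replaces A's quadratic pop-inner-loop by one hash-set of all domains plus a per-domain
-- scan of its dot-suffixes (objective: faster; return value only, A does not mutate its argument).

-- ===== PORT A =====
-- inner while loop over j: pop the elements ending with base (the pop loop IS a filter of the tail)
def pvInnerA (base : String) : List String → List String
  | [] => []
  | x :: xs => if PySem.Str.endswith x base then pvInnerA base xs else x :: pvInnerA base xs

-- termination fact the port's outer loop cites
theorem pvInnerA_length_le (base : String) (l : List String) : (pvInnerA base l).length ≤ l.length := by
  induction l with
  | nil => simp [pvInnerA]
  | cons x xs ih => simp only [pvInnerA]; split <;> simp only [List.length_cons] <;> omega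

-- outer while loop over i on the current (mutated) list
def pvOuterA (l : List String) (i : Nat) : List String :=
  if h : i < l.length then
    pvOuterA (l.take (i+1) ++ pvInnerA ("." ++ l[i]) (l.drop (i+1))) (i+1)
  else l
termination_by l.length - i
decreasing_by
  have h1 := pvInnerA_length_le ("." ++ l[i]) (l.drop (i+1))
  have h2 : (l.drop (i+1)).length = l.length - (i+1) := by simp
  simp only [List.length_append, List.length_take]
  omega

def calculateWhoisDomainList (domain_list : List String) : List String :=
  pvOuterA (PySem.List.sorted domain_list (fun x => PySem.Str.count x ".") false) 0

-- ===== PORT B =====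
def calculateWhoisDomainList_alt (domain_list : List String) : List String :=
  let domains : PySem.Set String := PySem.Set.ofList domain_list
  (PySem.List.sorted domain_list (fun x => PySem.Str.count x ".") false).filter
    (fun d => !((PySem.List.enumerate d.toList).any
      (fun p => p.2 == '.' && PySem.Set.contains domains (PySem.Str.slice d (some (p.1 + 1)) none))))

-- ===== PRECONDITION & SPEC =====
def Spec_calculateWhoisDomainList (domain_list : List String) (out : List String) : Prop := out = calculateWhoisDomainList_alt domain_list
instance (domain_list : List String) (out : List String) : Decidable (Spec_calculateWhoisDomainList domain_list out) := by unfold Spec_calculateWhoisDomainList; infer_instance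

-- ===== CLAIM (what is proved, stated in full; the proofs are below) =====
def Claim_equal_calculateWhoisDomainList : Prop := ∀ (domain_list : List String), Dom_calculateWhoisDomainList domain_list → Spec_calculateWhoisDomainList domain_list (calculateWhoisDomainList domain_list)

-- ===== LEMMAS AND PROOFS =====

-- d is removed by some member of l₀ ("d.endswith('.' + e)" for some e in l₀)
def pvRemB (l₀ : List String) (d : String) : Bool :=
  l₀.any (fun e => PySem.Chars.endswith d.toList ('.' :: e.toList))

theorem pvRemB_iff (l₀ : List String) (d : String) :
    pvRemB l₀ d = true ↔ ∃ e ∈ l₀, ('.' :: e.toList) <:+ d.toList := by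
  simp [pvRemB, List.any_eq_true, PySem.Chars.endswith_iff]

theorem pvDot_toList (x : String) : ("." ++ x).toList = '.' :: x.toList := by
  rw [String.toList_append]; rfl

theorem pvEndswith_eq (y x : String) :
    PySem.Str.endswith y ("." ++ x) = PySem.Chars.endswith y.toList ('.' :: x.toList) := by
  rw [PySem.Str.endswith_eq, pvDot_toList]

-- counting '.' : PySem.Str.count with a one-char needle is List.count
theorem pvCount_go (c : Char) (l : List Char) : ∀ (fuel acc : Nat), l.length ≤ fuel →
    PySem.Chars.count.go [c] fuel l acc = acc + l.count c := by
  induction l with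
  | nil => intro fuel acc h; cases fuel <;> simp [PySem.Chars.count.go]
  | cons x t ih =>
    intro fuel acc h
    cases fuel with
    | zero => simp at h
    | succ f =>
      rw [PySem.Chars.count.go]
      by_cases hc : c = x
      · subst hc
        rw [if_pos (by simp [List.isPrefixOf])]
        simp only [List.length_singleton, List.drop_one, List.tail_cons]
        rw [ih f (acc+1) (by simp at h; omega), List.count_cons_self]
        omega
      · rw [if_neg (by simp [List.isPrefixOf, hc])]
        rw [ih f acc (by simp at h; omega), List.count_cons_of_ne (by simp; exact fun hh => hc hh.symm)]

theorem pvCount_eq (s : String) : PySem.Str.count s "." = s.toList.count '.' := by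
  rw [PySem.Str.count_eq]
  show PySem.Chars.count s.toList ['.'] = _
  rw [PySem.Chars.count]
  rw [if_neg (by simp)]
  rw [pvCount_go '.' s.toList s.toList.length 0 le_rfl]; omega

theorem pvEnds_count_lt {d e : String} (h : ('.' :: e.toList) <:+ d.toList) :
    e.toList.count '.' < d.toList.count '.' := by
  have h1 : ('.' :: e.toList).count '.' ≤ d.toList.count '.' := h.sublist.count_le _
  simp only [List.count_cons_self] at h1
  omega

-- if something removes d, something UNREMOVED removes d
theorem pvMinRem (l₀ : List String) : ∀ (n : Nat) (e d : String), e.toList.count '.' < n →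
    e ∈ l₀ → ('.' :: e.toList) <:+ d.toList →
    ∃ f ∈ l₀, ('.' :: f.toList) <:+ d.toList ∧ pvRemB l₀ f = false := by
  intro n
  induction n with
  | zero => intro e d h; omega
  | succ n ih =>
    intro e d hlt he hed
    by_cases hr : pvRemB l₀ e = false
    · exact ⟨e, he, hed, hr⟩
    · have hr' : pvRemB l₀ e = true := by revert hr; cases pvRemB l₀ e <;> simp
      obtain ⟨f, hf, hfe⟩ := (pvRemB_iff l₀ e).mp hr'
      have hcnt := pvEnds_count_lt hfe
      have hfd : ('.' :: f.toList) <:+ d.toList :=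
        (hfe.trans (List.suffix_cons '.' e.toList)).trans hed
      exact ih f d (by omega) hf hfd

-- A's algorithm after sorting, head-first: keep the head, filter its subdomains, recurse
def pvSelf : List String → List String
  | [] => []
  | x :: xs => x :: pvSelf (xs.filter (fun y => !PySem.Str.endswith y ("." ++ x)))
termination_by l => l.length
decreasing_by
  simp only [List.length_unattach, List.length_cons]
  exact Nat.lt_succ_of_le (le_trans (List.length_filter_le _ _) (List.length_attach (l := xs)).le)

theorem pvInnerA_eq_filter (base : String) (l : List String) :
    pvInnerA base l = l.filter (fun y => !PySem.Str.endswith y base) := by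
  induction l with
  | nil => rfl
  | cons x xs ih => simp only [pvInnerA, List.filter_cons, ih]; split <;> simp_all

theorem pvOuter_eq (n : Nat) : ∀ (rest pre : List String), rest.length ≤ n →
    pvOuterA (pre ++ rest) pre.length = pre ++ pvSelf rest := by
  induction n with
  | zero =>
    intro rest pre h
    have : rest = [] := List.eq_nil_of_length_eq_zero (by omega)
    subst this
    rw [pvOuterA]
    simp [pvSelf]
  | succ n ih =>
    intro rest pre h
    cases rest with
    | nil => rw [pvOuterA]; simp [pvSelf]
    | cons x xs =>
      rw [pvOuterA]
      have hlt : pre.length < (pre ++ x :: xs).length := by simp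
      rw [dif_pos hlt]
      have hget : (pre ++ x :: xs)[pre.length] = x := by
        rw [List.getElem_append_right (le_refl pre.length)]
        simp
      have htake : (pre ++ x :: xs).take (pre.length + 1) = pre ++ [x] := by
        rw [List.take_append]
        simp
      have hdrop : (pre ++ x :: xs).drop (pre.length + 1) = xs := by
        rw [List.drop_append]
        simp
      rw [hget, htake, hdrop]
      have hlen : pre.length + 1 = (pre ++ [x]).length := by simp
      rw [hlen, pvInnerA_eq_filter,
        ih (xs.filter (fun y => !PySem.Str.endswith y ("." ++ x))) (pre ++ [x])
          (le_trans (List.length_filter_le _ _) (by simp at h; omega))]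
      rw [pvSelf]
      simp


theorem pvFilter_filter {α : Type} (p q : α → Bool) (l : List α)
    (h : ∀ a ∈ l, p a = true → q a = true) :
    (l.filter q).filter p = l.filter p := by
  induction l with
  | nil => rfl
  | cons x xs ih =>
    have ih' := ih (fun a ha => h a (List.mem_cons_of_mem _ ha))
    by_cases hp : p x = true
    · have hq := h x (by simp) hp
      simp [hp, hq, ih']
    · by_cases hq : q x = true <;> simp [hp, hq, ih']

theorem pvSelf_eq_filter (l₀ : List String) : ∀ (n : Nat) (l : List String), l.length ≤ n →
    l.Pairwise (fun a b => a.toList.count '.' ≤ b.toList.count '.') →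
    (∀ x ∈ l, x ∈ l₀) →
    (∀ d ∈ l, ∀ e ∈ l₀, pvRemB l₀ e = false → ('.' :: e.toList) <:+ d.toList → e ∈ l) →
    pvSelf l = l.filter (fun d => !pvRemB l₀ d) := by
  intro n
  induction n with
  | zero =>
    intro l h _ _ _
    have : l = [] := List.eq_nil_of_length_eq_zero (by omega)
    subst this; simp [pvSelf]
  | succ n ih =>
    intro l h hpair hmem hinv
    cases l with
    | nil => simp [pvSelf]
    | cons x xs =>
      -- the head is never removed
      have hx : pvRemB l₀ x = false := by
        by_contra hx
        have hx' : pvRemB l₀ x = true := by revert hx; cases pvRemB l₀ x <;> simp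
        obtain ⟨e, he, hxe⟩ := (pvRemB_iff l₀ x).mp hx'
        obtain ⟨f, hf, hxf, hfk⟩ :=
          pvMinRem l₀ (e.toList.count '.' + 1) e x (by omega) he hxe
        have hfx : f ∈ x :: xs := hinv x (by simp) f hf hfk hxf
        have hcnt := pvEnds_count_lt hxf
        rcases List.mem_cons.mp hfx with hfx1 | hfx2
        · subst hfx1; omega
        · have := (List.pairwise_cons.mp hpair).1 f hfx2
          omega
      rw [pvSelf, List.filter_cons]
      rw [if_pos (by rw [hx]; rfl)]
      -- elements kept by l₀ are never dropped by the head's filter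
      have hsur : ∀ y ∈ xs, (!pvRemB l₀ y) = true → (!PySem.Str.endswith y ("." ++ x)) = true := by
        intro y _ hy
        by_contra hc
        have hc' : PySem.Chars.endswith y.toList ('.' :: x.toList) = true := by
          rw [← pvEndswith_eq]; revert hc; cases PySem.Str.endswith y ("." ++ x) <;> simp
        have : pvRemB l₀ y = true := (pvRemB_iff l₀ y).mpr
          ⟨x, hmem x (by simp), (PySem.Chars.endswith_iff _ _).mp hc'⟩
        simp [this] at hy
      congr 1
      rw [ih (xs.filter (fun y => !PySem.Str.endswith y ("." ++ x)))
        (le_trans (List.length_filter_le _ _) (by simp at h; omega))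
        (((List.pairwise_cons.mp hpair).2).sublist (List.filter_sublist (l := xs) (p := fun y => !PySem.Str.endswith y ("." ++ x))))
        (fun y hy => hmem y (List.mem_cons_of_mem _ (List.mem_of_mem_filter hy)))
        ?_]
      · exact pvFilter_filter _ _ xs hsur
      · -- the invariant survives the head's filter
        intro d hd e he hek hde
        have hdxs := List.mem_of_mem_filter hd
        have hin := hinv d (List.mem_cons_of_mem _ hdxs) e he hek hde
        have hex : e ≠ x := by
          intro hex; subst hex
          have := (List.mem_filter.mp hd).2
          have hde2 : PySem.Chars.endswith d.toList ('.' :: e.toList) = true :=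
            (PySem.Chars.endswith_iff _ _).mpr hde
          simp [hde2] at this
        rcases List.mem_cons.mp hin with hin1 | hin2
        · exact absurd hin1 hex
        · exact List.mem_filter.mpr ⟨hin2, hsur e hin2 (by simp [hek])⟩

-- B's per-domain test equals "some member of l₀ removes d"
theorem pvAlt_pred (l₀ : List String) (d : String) :
    ((PySem.List.enumerate d.toList).any
      (fun p => p.2 == '.' && PySem.Set.contains (PySem.Set.ofList l₀) (PySem.Str.slice d (some (p.1 + 1)) none)))
    = pvRemB l₀ d := by
  rw [Bool.eq_iff_iff]
  constructor
  · intro h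
    obtain ⟨p, hpmem, hpcond⟩ := List.any_eq_true.mp h
    obtain ⟨k, hk, rfl⟩ := (PySem.List.mem_enumerate_iff _ _ _).mp hpmem
    simp only [Bool.and_eq_true, beq_iff_eq] at hpcond
    obtain ⟨hdot, hcont⟩ := hpcond
    set e := PySem.Str.slice d (some ((0 : Int) + ↑k + 1)) none with hedef
    have hel : e ∈ l₀ := by
      have := (PySem.Set.contains_iff _ _).mp hcont
      exact (PySem.Set.mem_ofList _ _).mp this
    have hetl : e.toList = d.toList.drop (k + 1) := by
      rw [hedef, PySem.Str.toList_slice, PySem.Chars.slice_eq_listSlice,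
        PySem.List.slice_from d.toList (a := (0 : Int) + ↑k + 1) (by omega)]
      congr 1
      omega
    refine (pvRemB_iff l₀ d).mpr ⟨e, hel, ?_⟩
    have hdk : d.toList.drop k = d.toList[k] :: d.toList.drop (k + 1) :=
      List.drop_eq_getElem_cons hk
    rw [hetl, ← hdot, ← hdk]
    exact List.drop_suffix k d.toList
  · intro h
    obtain ⟨e, he, hsuf⟩ := (pvRemB_iff l₀ d).mp h
    obtain ⟨p, hp⟩ := hsuf
    have hk : p.length < d.toList.length := by
      rw [← hp]; simp
    have hdot : d.toList[p.length]'hk = '.' := by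
      simp only [← hp]
      rw [List.getElem_append_right (le_refl p.length)]
      simp
    have hdrop : d.toList.drop (p.length + 1) = e.toList := by
      rw [← hp, List.drop_append]
      simp
    refine List.any_eq_true.mpr ⟨((0 : Int) + ↑p.length, d.toList[p.length]'hk), ?_, ?_⟩
    · exact (PySem.List.mem_enumerate_iff _ _ _).mpr ⟨p.length, hk, rfl⟩
    · simp only [Bool.and_eq_true, beq_iff_eq]
      refine ⟨hdot, ?_⟩
      have heq : PySem.Str.slice d (some ((0 : Int) + ↑p.length + 1)) none = e := by
        apply String.toList_inj.mp
        rw [PySem.Str.toList_slice, PySem.Chars.slice_eq_listSlice,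
          PySem.List.slice_from d.toList (a := (0 : Int) + ↑p.length + 1) (by omega)]
        rw [← hdrop]
        congr 1
        omega
      rw [heq]
      exact (PySem.Set.contains_iff _ _).mpr ((PySem.Set.mem_ofList _ _).mpr he)

-- ===== VERDICT (by name: the statement is the Claim_ definition above) =====
theorem calculateWhoisDomainList_spec : Claim_equal_calculateWhoisDomainList := by
  intro l _
  unfold Spec_calculateWhoisDomainList calculateWhoisDomainList calculateWhoisDomainList_alt
  set srt := PySem.List.sorted l (fun x => PySem.Str.count x ".") false with hs
  have h0 := pvOuter_eq srt.length srt [] le_rfl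
  simp only [List.nil_append, List.length_nil] at h0
  rw [h0]
  have h1 : srt.filter
      (fun d => !((PySem.List.enumerate d.toList).any
        (fun p => p.2 == '.' && PySem.Set.contains (PySem.Set.ofList l) (PySem.Str.slice d (some (p.1 + 1)) none))))
      = srt.filter (fun d => !pvRemB l d) :=
    List.filter_congr (fun d _ => by rw [pvAlt_pred l d])
  simp only []
  rw [h1]
  apply pvSelf_eq_filter l srt.length srt le_rfl
  · have hp := PySem.List.sorted_pairwise l (fun x => PySem.Str.count x ".")
    exact hp.imp (fun {a b} h => by rw [← pvCount_eq, ← pvCount_eq]; exact h)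
  · exact fun x hx => (PySem.List.mem_sorted l _ false x).mp hx
  · exact fun d _ e he _ _ => (PySem.List.mem_sorted l _ false e).mpr he
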